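-- pv_equiv track=rewrite | github.com/pypi-data/pypi-mirror-193 | packages/a-pandas-ex-set/a_pandas_ex_set-0.10.tar.gz/a_pandas_ex_set-0.10/a_pandas_ex_set/__init__.py | iter_rotate_right
-- ===== SOURCE A (Python) =====
-- def iter_rotate_right(iterable, n, onlyfinal=False):
--     try:
--         iterable_ = iterable.copy()
--     except Exception:
--         iterable_ = iterable
--
--     for _ in range(n):
--         iterable_ = iterable_[-1:] + iterable_[:-1]
--         if not onlyfinal:
--             yield iterable_
--     if onlyfinal:
--         yield iterable_
-- ===== SOURCE B (Python) =====
-- def iter_rotate_right(iterable, n, onlyfinal=False):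
--     base = list(iterable)
--     L = len(base)
--     if onlyfinal:
--         k = n % L if L and n > 0 else 0
--         yield base[L - k:] + base[:L - k]
--     else:
--         for i in range(1, n + 1):
--             k = i % L if L else 0
--             yield base[L - k:] + base[:L - k]
-- ===== Notes on version B (the rewrite author's own statement) =====
-- stated objective: faster
-- what changed: B replaces A's n sequential one-step rotations (each building a new list) with direct modular slicing from the original list: the onlyfinal result is a single rotation by n mod len, and each yielded step i is computed independently as a rotation by i mod len.
import Mathlib
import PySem

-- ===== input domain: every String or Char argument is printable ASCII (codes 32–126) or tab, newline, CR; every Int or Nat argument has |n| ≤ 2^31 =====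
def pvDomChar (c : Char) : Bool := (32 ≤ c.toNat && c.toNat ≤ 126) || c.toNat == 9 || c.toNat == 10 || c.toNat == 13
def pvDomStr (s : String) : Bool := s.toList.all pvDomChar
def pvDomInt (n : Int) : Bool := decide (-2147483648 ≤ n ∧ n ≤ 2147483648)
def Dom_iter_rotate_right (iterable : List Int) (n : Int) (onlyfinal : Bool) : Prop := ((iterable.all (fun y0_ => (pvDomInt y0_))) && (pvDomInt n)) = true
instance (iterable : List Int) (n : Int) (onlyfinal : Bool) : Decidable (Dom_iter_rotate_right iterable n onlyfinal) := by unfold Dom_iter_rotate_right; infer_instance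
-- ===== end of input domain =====

-- B replaces A's n sequential one-step rotations by direct modular slicing from the original
-- list (for onlyfinal a single rotation by n mod len); the yielded lists are proved equal.

-- ===== PORT A =====
-- one loop body step: iterable_[-1:] + iterable_[:-1]
def pvAStep (xs : List Int) : List Int :=
  PySem.List.slice xs (some (-1)) none ++ PySem.List.slice xs none (some (-1))

-- the 'for _ in range(n)' loop: carries (values yielded so far, current iterable_)
def pvALoop (onlyfinal : Bool) : Nat → List Int → List (List Int) → List (List Int) × List Int
  | 0, cur, acc => (acc, cur)
  | Nat.succ k, cur, acc =>
      let nxt := pvAStep cur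
      pvALoop onlyfinal k nxt (if onlyfinal then acc else acc ++ [nxt])

def iter_rotate_right (iterable : List Int) (n : Int) (onlyfinal : Bool) : List (List Int) :=
  let r := pvALoop onlyfinal n.toNat iterable []
  if onlyfinal then r.1 ++ [r.2] else r.1

-- ===== PORT B =====
-- base[L - k:] + base[:L - k]
def pvRotK (base : List Int) (L k : Int) : List Int :=
  PySem.List.slice base (some (L - k)) none ++ PySem.List.slice base none (some (L - k))

def iter_rotate_right_alt (iterable : List Int) (n : Int) (onlyfinal : Bool) : List (List Int) :=
  let base := iterable
  let L : Int := base.length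
  if onlyfinal then
    let k := if L ≠ 0 ∧ 0 < n then PySem.Int.mod n L else 0
    [pvRotK base L k]
  else
    (PySem.List.pyRange 1 (n + 1) 1).map (fun i =>
      pvRotK base L (if L ≠ 0 then PySem.Int.mod i L else 0))

-- ===== PRECONDITION & SPEC =====
def Spec_iter_rotate_right (iterable : List Int) (n : Int) (onlyfinal : Bool) (out : List (List Int)) : Prop := out = iter_rotate_right_alt iterable n onlyfinal
instance (iterable : List Int) (n : Int) (onlyfinal : Bool) (out : List (List Int)) : Decidable (Spec_iter_rotate_right iterable n onlyfinal out) := by unfold Spec_iter_rotate_right; infer_instance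

-- ===== CLAIM (what is proved, stated in full; the proofs are below) =====
def Claim_equal_iter_rotate_right : Prop := ∀ (iterable : List Int) (n : Int) (onlyfinal : Bool), Dom_iter_rotate_right iterable n onlyfinal → Spec_iter_rotate_right iterable n onlyfinal (iter_rotate_right iterable n onlyfinal)

-- ===== LEMMAS AND PROOFS =====

-- left rotation by j: characterises both ports' intermediate lists
def pvG (base : List Int) (j : Nat) : List Int := base.drop j ++ base.take j

theorem pvAStep_g (base : List Int) (j : Nat) (hL : 0 < base.length) (hj : j < base.length) :
    pvAStep (pvG base j) = pvG base (if j = 0 then base.length - 1 else j - 1) := by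
  have hstep : ∀ xs : List Int, pvAStep xs = xs.drop (xs.length - 1) ++ xs.take (xs.length - 1) := by
    intro xs
    rw [pvAStep, PySem.List.slice_from_neg_one, PySem.List.slice_to_neg_one, List.dropLast_eq_take]
  rw [hstep]
  have hlen : (pvG base j).length = base.length := by simp [pvG]; omega
  rw [hlen, pvG, pvG]
  rcases Nat.eq_zero_or_pos j with hj0 | hj0
  · subst hj0
    simp
  · rw [if_neg (by omega)]
    rw [List.drop_append, List.take_append]
    have h1 : (base.drop j).drop (base.length - 1) = [] := by
      rw [List.drop_eq_nil_iff]; simp; omega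
    have h2 : (base.drop j).take (base.length - 1) = base.drop j := by
      rw [List.take_of_length_le]; simp; omega
    have h3 : base.length - 1 - (base.drop j).length = j - 1 := by simp; omega
    rw [h1, h2, h3]
    have h4 : (base.take j).take (j - 1) = base.take (j - 1) := by
      rw [List.take_take]; congr 1; omega
    have h5 : base.drop (j-1) = (base.take j).drop (j-1) ++ base.drop j := by
      conv_lhs => rw [← List.take_append_drop j base, List.drop_append]
      have h6 : j - 1 - (base.take j).length = 0 := by
        rw [List.length_take]; omega
      rw [h6, List.drop_zero]
    rw [List.nil_append, h4, h5, List.append_assoc]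

-- the loop state after i iterations
def pvState (base : List Int) : Nat → List Int
  | 0 => base
  | Nat.succ i => pvAStep (pvState base i)

theorem pvG_zero (base : List Int) : pvG base 0 = base := by simp [pvG]
theorem pvG_len (base : List Int) : pvG base base.length = base := by simp [pvG]

theorem pvState_eq (base : List Int) (hL : 0 < base.length) (i : Nat) :
    pvState base i = pvG base ((base.length - i % base.length) % base.length) := by
  induction i with
  | zero => simp [pvState, Nat.mod_self, pvG_zero]
  | succ i ih =>
    rw [pvState, ih]
    set L := base.length with hLdef
    have hr : i % L < L := Nat.mod_lt _ hL
    have hsucc : (i + 1) % L = (i % L + 1) % L := by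
      conv_lhs => rw [← Nat.mod_add_mod]
    have hjlt : (L - i % L) % L < L := Nat.mod_lt _ hL
    rw [pvAStep_g base _ hL hjlt]
    rcases Nat.eq_zero_or_pos (i % L) with h0 | hpos
    · rw [h0] at hsucc
      rcases Nat.eq_or_lt_of_le hL with hL1 | hL2
      · have hL1' : L = 1 := by omega
        have hb : base.length = 1 := by omega
        rw [hL1']
        simp [Nat.mod_one, hb]
      · have h1 : (1 : Nat) % L = 1 := Nat.mod_eq_of_lt (by omega)
        rw [hsucc, Nat.zero_add, h1, h0]
        have hz : (L - 0) % L = 0 := by simp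
        rw [hz, if_pos rfl]
        congr 1
        rw [Nat.mod_eq_of_lt (by omega)]
    · have hji : (L - i % L) % L = L - i % L := Nat.mod_eq_of_lt (by omega)
      rw [hji, if_neg (by omega)]
      rcases Nat.eq_or_lt_of_le (Nat.succ_le_of_lt hr) with hend | hmid
      · have hend' : i % L + 1 = L := by omega
        have h2 : (i + 1) % L = 0 := by rw [hsucc, hend', Nat.mod_self]
        rw [h2]
        have h3 : L - i % L - 1 = 0 := by omega
        rw [h3]
        simp
      · have h2 : (i + 1) % L = i % L + 1 := by
          rw [hsucc, Nat.mod_eq_of_lt (by omega)]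
        rw [h2]
        have h3 : (L - (i % L + 1)) % L = L - (i % L + 1) := Nat.mod_eq_of_lt (by omega)
        rw [h3]
        congr 1

theorem pvAStep_nil : pvAStep [] = [] := by decide

theorem pvState_nil (i : Nat) : pvState [] i = [] := by
  induction i with
  | zero => rfl
  | succ i ih => rw [pvState, ih, pvAStep_nil]

theorem pvState_succ_front (cur : List Int) (k : Nat) :
    pvState (pvAStep cur) k = pvState cur (k + 1) := by
  induction k with
  | zero => rfl
  | succ k ih => simp [pvState, ih]

theorem pvALoop_snd (onlyfinal : Bool) (m : Nat) (cur : List Int) (acc : List (List Int)) :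
    (pvALoop onlyfinal m cur acc).2 = pvState cur m := by
  induction m generalizing cur acc with
  | zero => rfl
  | succ k ih => simp only [pvALoop, ih, pvState_succ_front]

theorem pvALoop_fst_true (m : Nat) (cur : List Int) (acc : List (List Int)) :
    (pvALoop true m cur acc).1 = acc := by
  induction m generalizing cur acc with
  | zero => rfl
  | succ k ih => simp [pvALoop, ih]

theorem pvALoop_fst_false (m : Nat) (cur : List Int) (acc : List (List Int)) :
    (pvALoop false m cur acc).1 = acc ++ (List.range m).map (fun i => pvState cur (i + 1)) := by
  induction m generalizing cur acc with
  | zero => simp [pvALoop]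
  | succ k ih =>
    rw [List.range_succ_eq_map]
    simp [pvALoop, ih, pvState_succ_front, Function.comp]
    rfl

theorem pvRotK_g (base : List Int) (k : Nat) (hk : k ≤ base.length) :
    pvRotK base (base.length : Int) (k : Int) = pvG base (base.length - k) := by
  have h : (base.length : Int) - (k : Int) = ((base.length - k : Nat) : Int) := by omega
  rw [pvRotK, h, PySem.List.slice_from_natCast, PySem.List.slice_to_natCast, pvG]

theorem pvRotK_nil (k : Int) : pvRotK [] 0 k = [] := by
  simp [pvRotK, PySem.List.slice]

-- the loop state at i equals B's slice expression with k = i % len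
theorem pvState_rotK (base : List Int) (hL : 0 < base.length) (i : Nat) :
    pvState base i = pvRotK base (base.length : Int) ((i % base.length : Nat) : Int) := by
  rw [pvRotK_g base _ (le_of_lt (Nat.mod_lt _ hL)), pvState_eq base hL]
  rcases Nat.eq_zero_or_pos (i % base.length) with h0 | hpos
  · rw [h0]
    simp [pvG_len, pvG_zero]
  · congr 1
    exact Nat.mod_eq_of_lt (by omega)

-- ===== VERDICT (by name: the statement is the Claim_ definition above) =====
theorem iter_rotate_right_spec : Claim_equal_iter_rotate_right := by
  intro iterable n onlyfinal _
  unfold Spec_iter_rotate_right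
  rcases onlyfinal with _ | _
  · -- onlyfinal = false
    rw [iter_rotate_right, iter_rotate_right_alt]
    simp only [pvALoop_fst_false]
    rw [PySem.List.pyRange_one]
    have h1 : (n + 1 - 1 : Int) = n := by omega
    rw [h1, List.map_map]
    apply List.map_congr_left
    intro i hi
    simp only [Function.comp]
    by_cases hL : iterable.length = 0
    · have hnil : iterable = [] := List.eq_nil_of_length_eq_zero hL
      subst hnil
      rw [pvState_nil, if_neg (by simp)]
      simpa using (pvRotK_nil 0).symm
    · have hLpos : 0 < iterable.length := Nat.pos_of_ne_zero hL
      rw [if_pos (by exact_mod_cast hL)]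
      rw [pvState_rotK _ hLpos]
      congr 1
      have hc : (1 : Int) + (i : Int) = ((i + 1 : Nat) : Int) := by push_cast; ring
      rw [hc, PySem.Int.mod_natCast]
  · -- onlyfinal = true
    rw [iter_rotate_right, iter_rotate_right_alt]
    simp only [reduceIte, pvALoop_fst_true, List.nil_append, pvALoop_snd]
    by_cases hL : iterable.length = 0
    · have hnil : iterable = [] := List.eq_nil_of_length_eq_zero hL
      subst hnil
      rw [pvState_nil]
      simp [pvRotK_nil]
    · have hLpos : 0 < iterable.length := Nat.pos_of_ne_zero hL
      by_cases hn : 0 < n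
      · rw [if_pos ⟨by exact_mod_cast hL, hn⟩, pvState_rotK _ hLpos]
        congr 2
        have hn' : n = ((n.toNat : Nat) : Int) := by omega
        conv_rhs => rw [hn']
        rw [PySem.Int.mod_natCast]
      · rw [if_neg (fun h => hn h.2)]
        have h0 : n.toNat = 0 := by omega
        rw [h0, pvState]
        have hr : pvRotK iterable (iterable.length : Int) 0 = pvG iterable iterable.length := by
          simpa using pvRotK_g iterable 0 (by omega)
        rw [hr, pvG_len]
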